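-- pv_equiv track=rewrite | github.com/MatevzMiscic/LinearProgramming | simplex2.py | lsb
-- ===== SOURCE A (Python) =====
-- def lsb(n):
--     if n == 0:
--         return -1
--     k = 0
--     while n & 1 == 0:
--         k += 1
--         n >>= 1
--     return k
-- ===== SOURCE B (Python) =====
-- def lsb(n):
--     if n == 0:
--         return -1
--     return (n & -n).bit_length() - 1
-- ===== Notes on version B (the rewrite author's own statement) =====
-- stated objective: idiomatic
-- what changed: Replaces the trailing-zero shift loop with a closed-form bit trick: masking n with its negation isolates the lowest set bit, whose bit length gives the index directly without any loop.
import Mathlib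
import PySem

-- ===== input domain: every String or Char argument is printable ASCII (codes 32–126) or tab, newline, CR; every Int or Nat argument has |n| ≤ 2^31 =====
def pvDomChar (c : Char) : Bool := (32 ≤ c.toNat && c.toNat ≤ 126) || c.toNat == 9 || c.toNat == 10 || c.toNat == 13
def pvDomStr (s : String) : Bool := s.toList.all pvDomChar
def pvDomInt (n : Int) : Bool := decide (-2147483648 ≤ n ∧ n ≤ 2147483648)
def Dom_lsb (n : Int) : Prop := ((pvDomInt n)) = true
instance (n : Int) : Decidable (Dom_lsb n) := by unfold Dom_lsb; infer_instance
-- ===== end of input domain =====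

-- B replaces A's trailing-zero shift loop with the closed-form bit trick
-- (n & -n).bit_length() - 1 (idiomatic; no loop), same value on every Int.

-- ===== PORT A =====
-- the while loop; the `n ≠ 0` conjunct only makes the recursion total
-- (Python's loop is entered only with n ≠ 0, where it terminates)
def lsbLoop (n k : Int) : Int :=
  if h : n ≠ 0 ∧ PySem.Int.band n 1 = 0 then lsbLoop (n >>> (1 : Nat)) (k + 1) else k
termination_by n.natAbs
decreasing_by
  have hdvd : (2 : Int) ∣ n := by
    rw [PySem.Int.band_one, PySem.Int.mod_eq_zero_iff_dvd] at h
    exact h.2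
  obtain ⟨c, rfl⟩ := hdvd
  have hc : c ≠ 0 := by
    intro hc0; exact h.1 (by simp [hc0])
  have hs : (2 * c) >>> (1 : Nat) = c := by
    rw [Int.shiftRight_eq_div_pow]; norm_num
  rw [hs]
  omega

def lsb (n : Int) : Int :=
  if n = 0 then -1 else lsbLoop n 0

-- ===== PORT B =====
def lsb_alt (n : Int) : Int :=
  if n = 0 then -1
  else (PySem.Int.bitLength (PySem.Int.band n (-n)) : Int) - 1

-- ===== PRECONDITION & SPEC =====
def Spec_lsb (n : Int) (out : Int) : Prop := out = lsb_alt n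
instance (n : Int) (out : Int) : Decidable (Spec_lsb n out) := by unfold Spec_lsb; infer_instance

-- ===== CLAIM (what is proved, stated in full; the proofs are below) =====
def Claim_equal_lsb : Prop := ∀ (n : Int), Dom_lsb n → Spec_lsb n (lsb n)

-- ===== LEMMAS AND PROOFS =====

-- for odd m = 2t+1, m &&& (m-1) clears exactly the low bit
lemma pv_and_pred_odd (t : Nat) : (2 * t + 1) &&& (2 * t) = 2 * t := by
  apply Nat.eq_of_testBit_eq
  intro i
  cases i with
  | zero =>
      have h1 : (2 * t + 1) % 2 = 1 := by omega
      have h2 : (2 * t) % 2 = 0 := by omega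
      simp [Nat.testBit_zero, h1, h2]
  | succ i =>
      rw [Nat.testBit_and, Nat.testBit_succ, Nat.testBit_succ]
      have e1 : (2 * t + 1) / 2 = t := by omega
      have e2 : (2 * t) / 2 = t := by omega
      simp [e1, e2]

-- for even m = 2u (u > 0), m &&& (m-1) is twice u &&& (u-1)
lemma pv_and_pred_even (u : Nat) (h : 0 < u) :
    (2 * u) &&& (2 * u - 1) = 2 * (u &&& (u - 1)) := by
  apply Nat.eq_of_testBit_eq
  intro i
  cases i with
  | zero =>
      have h1 : (2 * u) % 2 = 0 := by omega
      have h2 : (2 * (u &&& (u - 1))) % 2 = 0 := by omega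
      simp [Nat.testBit_zero, h1, h2]
  | succ i =>
      rw [Nat.testBit_and, Nat.testBit_succ, Nat.testBit_succ, Nat.testBit_succ]
      have e1 : (2 * u) / 2 = u := by omega
      have e2 : (2 * u - 1) / 2 = u - 1 := by omega
      have e3 : (2 * (u &&& (u - 1))) / 2 = u &&& (u - 1) := by omega
      rw [e1, e2, e3, Nat.testBit_and]

lemma pv_f_pos (u : Nat) (h : 0 < u) : 0 < u - (u &&& (u - 1)) := by
  have := Nat.and_le_right (n := u) (m := u - 1)
  omega

-- Python's n & -n, written through natAbs
lemma pv_band_neg_self (n : Int) (h : n ≠ 0) :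
    PySem.Int.band n (-n)
      = ((n.natAbs - (n.natAbs &&& (n.natAbs - 1)) : Nat) : Int) := by
  unfold PySem.Int.band
  rcases lt_or_gt_of_ne h with hneg | hpos
  · have c1 : ¬ (0 ≤ n) := by omega
    have c2 : 0 ≤ -n := by omega
    simp only [c1, c2, if_true, if_false]
    have e1 : (-n).toNat = n.natAbs := by omega
    have e2 : (-n - 1).toNat = n.natAbs - 1 := by omega
    rw [e1, e2]
  · have c1 : 0 ≤ n := by omega
    have c2 : ¬ (0 ≤ -n) := by omega
    simp only [c1, c2, if_true, if_false, neg_neg]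
    have e1 : n.toNat = n.natAbs := by omega
    have e2 : (n - 1).toNat = n.natAbs - 1 := by omega
    rw [e1, e2]

-- the loop computes k + bit_length(lowest set bit) - 1
lemma pv_loop_eq (m : Nat) : ∀ (n k : Int), n ≠ 0 → n.natAbs = m →
    lsbLoop n k
      = k + (PySem.Int.bitLength ((m - (m &&& (m - 1)) : Nat) : Int) : Int) - 1 := by
  induction m using Nat.strong_induction_on with
  | _ m ih =>
    intro n k hn hm
    by_cases hdvd : (2 : Int) ∣ n
    · -- even: loop iterates once, use IH at m / 2
      obtain ⟨c, rfl⟩ := hdvd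
      have hc : c ≠ 0 := by intro hc0; exact hn (by simp [hc0])
      have hcond : PySem.Int.band (2 * c) 1 = 0 := by
        rw [PySem.Int.band_one, PySem.Int.mod_eq_zero_iff_dvd]
        exact ⟨c, rfl⟩
      rw [lsbLoop.eq_def]
      simp only [hn, hcond, ne_eq, not_false_eq_true, and_self, dite_true]
      have hs : (2 * c) >>> (1 : Nat) = c := by
        rw [Int.shiftRight_eq_div_pow]; norm_num
      have hm2 : c.natAbs = m / 2 := by omega
      have hlt : m / 2 < m := by omega
      rw [hs, ih (m / 2) hlt c (k + 1) hc hm2]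
      -- relate bit lengths: m - (m &&& (m-1)) = 2 * (m/2 - (m/2 &&& (m/2 - 1)))
      set u := m / 2 with hu
      have hupos : 0 < u := by omega
      have hmu : m = 2 * u := by omega
      have heven := pv_and_pred_even u hupos
      have hfe : m - (m &&& (m - 1)) = 2 * (u - (u &&& (u - 1))) := by
        have hle : u &&& (u - 1) ≤ u - 1 := Nat.and_le_right
        rw [hmu, heven]; omega
      have hfpos : 0 < 2 * (u - (u &&& (u - 1))) := by
        have := pv_f_pos u hupos; omega
      have hbl : PySem.Int.bitLength ((m - (m &&& (m - 1)) : Nat) : Int)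
          = PySem.Int.bitLength ((u - (u &&& (u - 1)) : Nat) : Int) + 1 := by
        rw [hfe, PySem.Int.bitLength_natCast hfpos]
        congr 2
        omega
      rw [hbl]
      push_cast
      ring
    · -- odd: loop exits at once; lowest set bit is 1
      have hcond : ¬ PySem.Int.band n 1 = 0 := by
        rw [PySem.Int.band_one, PySem.Int.mod_eq_zero_iff_dvd]
        exact hdvd
      rw [lsbLoop.eq_def]
      simp only [hn, hcond, ne_eq, not_false_eq_true, and_false, dite_false]
      have hmodd : ¬ (2 ∣ m) := by
        intro hdm
        exact hdvd (by
          have : (2 : Int) ∣ (n.natAbs : Int) := by exact_mod_cast hm ▸ Int.natCast_dvd_natCast.mpr hdm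
          rcases Int.natAbs_eq n with he | he
          · rw [← he] at this; exact this
          · rw [he]; exact Dvd.dvd.neg_right this)
      obtain ⟨t, ht⟩ : ∃ t, m = 2 * t + 1 := ⟨m / 2, by omega⟩
      have : m - (m &&& (m - 1)) = 1 := by
        rw [ht]
        have : (2 * t + 1) - 1 = 2 * t := by omega
        rw [this, pv_and_pred_odd]
        omega
      rw [this]
      have h1 : PySem.Int.bitLength ((1 : Nat) : Int) = 1 := by decide
      rw [h1]
      push_cast
      ring

-- ===== VERDICT (by name: the statement is the Claim_ definition above) =====
theorem lsb_spec : Claim_equal_lsb := by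
  intro n _
  unfold Spec_lsb lsb lsb_alt
  by_cases h0 : n = 0
  · simp [h0]
  · simp only [h0, if_false]
    rw [pv_band_neg_self n h0, pv_loop_eq n.natAbs n 0 h0 rfl]
    ring
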